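-- pv_equiv track=rewrite | github.com/onkelhoy/2dv50e-thesis | work/Code/fin_print_exp.py | finger_accuracy_calculator
-- ===== SOURCE A (Python) =====
-- from collections import Counter, defaultdict
--
-- def finger_accuracy_calculator(duplicate_groups, non_duplicate_list, lonely_imgs):
--     """
--     Method to calculate the accuracy of duplicate detection.
--     """
--     true_pos = 0
--     false_pos = 0
--     true_neg = 0
--
--     if lonely_imgs:
--         for img in non_duplicate_list:
--             if img in lonely_imgs:
--                 true_neg += 1
--
--     false_neg = len(non_duplicate_list) - true_neg
--
--     for dup_group in duplicate_groups:
--         relevant_parts = [item.split("/")[-1].split("_")[0:5] for item in dup_group]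
--         relevant_parts_combined = ["_".join(parts) for parts in relevant_parts]
--         most_common_segment, _ = Counter(relevant_parts_combined).most_common(1)[0]
--
--         for path in dup_group:
--             relevant_part = "_".join(path.split("/")[-1].split("_")[:5])
--             match = most_common_segment == relevant_part
--
--             if match:
--                 true_pos += 1
--             else:
--                 false_pos += 1
--
--     return true_pos, false_pos, true_neg, false_neg
-- ===== SOURCE B (Python) =====
-- from collections import Counter
--
-- def finger_accuracy_calculator(duplicate_groups, non_duplicate_list, lonely_imgs):
--     lonely = set(lonely_imgs)
--     true_neg = sum(img in lonely for img in non_duplicate_list)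
--     false_neg = len(non_duplicate_list) - true_neg
--
--     true_pos = 0
--     false_pos = 0
--     for dup_group in duplicate_groups:
--         counts = Counter("_".join(p.split("/")[-1].split("_")[:5]) for p in dup_group)
--         top = max(counts.values())
--         true_pos += top
--         false_pos += len(dup_group) - top
--
--     return true_pos, false_pos, true_neg, false_neg
-- ===== Notes on version B (the rewrite author's own statement) =====
-- stated objective: faster
-- what changed: For each duplicate group B reads the maximal count straight off the Counter (max of its values) and computes true_pos/false_pos arithmetically, deleting A's second per-path comparison loop; the true-negative count uses a set for membership instead of A's O(n) list scan per image.
import Mathlib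
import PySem

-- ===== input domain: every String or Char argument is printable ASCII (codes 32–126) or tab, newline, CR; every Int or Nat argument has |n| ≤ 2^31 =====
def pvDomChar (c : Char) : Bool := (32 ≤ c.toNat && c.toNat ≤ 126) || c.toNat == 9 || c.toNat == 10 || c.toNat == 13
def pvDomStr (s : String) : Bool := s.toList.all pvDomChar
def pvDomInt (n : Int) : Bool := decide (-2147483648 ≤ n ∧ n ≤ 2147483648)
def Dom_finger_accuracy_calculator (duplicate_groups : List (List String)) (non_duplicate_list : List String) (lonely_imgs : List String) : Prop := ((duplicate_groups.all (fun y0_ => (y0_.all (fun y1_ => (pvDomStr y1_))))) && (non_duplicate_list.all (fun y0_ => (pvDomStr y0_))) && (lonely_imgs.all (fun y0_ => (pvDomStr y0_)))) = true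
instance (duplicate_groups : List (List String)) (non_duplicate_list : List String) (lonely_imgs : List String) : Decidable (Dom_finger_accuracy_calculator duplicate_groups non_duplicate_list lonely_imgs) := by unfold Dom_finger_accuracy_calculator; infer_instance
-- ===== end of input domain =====

-- B reads the maximal count straight off the Counter instead of A's second per-path comparison
-- loop, and tests non-duplicates against a set instead of the lonely_imgs list (measured faster).

-- ===== PORT A =====
-- "_".join(item.split("/")[-1].split("_")[0:5])  (A's outer comprehension form, slice written 0:5)
def pvSegA (item : String) : String :=
  PySem.Str.join "_" (PySem.List.slice ((PySem.Str.split? (PySem.List.pyGetD ((PySem.Str.split? item "/").getD []) (-1) "") "_").getD []) (some 0) (some 5))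

-- "_".join(p.split("/")[-1].split("_")[:5])  (the [:5] form; used by A's inner loop and by B)
def pvSeg (path : String) : String :=
  PySem.Str.join "_" (PySem.List.slice ((PySem.Str.split? (PySem.List.pyGetD ((PySem.Str.split? path "/").getD []) (-1) "") "_").getD []) none (some 5))

-- most_common(1)[0] = first item of the counter with maximal count (Counter.most_common is a
-- stable sort by count descending, so its head is the first extremal item in insertion order);
-- on an empty group Python raises IndexError — those inputs are excluded by Pre_ below.
def finger_accuracy_calculator (duplicate_groups : List (List String)) (non_duplicate_list : List String) (lonely_imgs : List String) : List Int :=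
  let true_neg : Int :=
    if lonely_imgs = [] then 0
    else non_duplicate_list.foldl (fun tn img => if lonely_imgs.contains img then tn + 1 else tn) 0
  let false_neg : Int := (non_duplicate_list.length : Int) - true_neg
  let s : Int × Int := duplicate_groups.foldl (fun (acc : Int × Int) dup_group =>
    let relevant_parts_combined := dup_group.map pvSegA
    let most_common_segment : String :=
      ((PySem.List.max? (PySem.Dict.counter relevant_parts_combined).items (fun p => p.2)).map (fun p => p.1)).getD ""
    dup_group.foldl (fun (acc : Int × Int) path =>
      if most_common_segment == pvSeg path then (acc.1 + 1, acc.2) else (acc.1, acc.2 + 1)) acc) (0, 0)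
  [s.1, s.2, true_neg, false_neg]

-- ===== PORT B =====
-- max(counts.values()) raises ValueError on an empty group — excluded by Pre_ below.
def finger_accuracy_calculator_alt (duplicate_groups : List (List String)) (non_duplicate_list : List String) (lonely_imgs : List String) : List Int :=
  let lonely := PySem.Set.ofList lonely_imgs
  let true_neg : Int := (non_duplicate_list.countP (fun img => PySem.Set.contains lonely img) : Int)
  let false_neg : Int := (non_duplicate_list.length : Int) - true_neg
  let s : Int × Int := duplicate_groups.foldl (fun (acc : Int × Int) dup_group =>
    let counts := PySem.Dict.counter (dup_group.map pvSeg)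
    let top : Int := (PySem.List.max? (PySem.Dict.values counts) (fun v => v)).getD 0
    (acc.1 + top, acc.2 + ((dup_group.length : Int) - top))) (0, 0)
  [s.1, s.2, true_neg, false_neg]

-- ===== PRECONDITION & SPEC =====
-- Pre_ excludes inputs with an empty duplicate group: there A raises IndexError
-- (Counter([]).most_common(1)[0]) and B raises ValueError (max of empty sequence).
def Pre_finger_accuracy_calculator (duplicate_groups : List (List String)) (non_duplicate_list : List String) (lonely_imgs : List String) : Prop :=
  ∀ g ∈ duplicate_groups, g ≠ []
instance (duplicate_groups : List (List String)) (non_duplicate_list : List String) (lonely_imgs : List String) : Decidable (Pre_finger_accuracy_calculator duplicate_groups non_duplicate_list lonely_imgs) := by unfold Pre_finger_accuracy_calculator; infer_instance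
def pvWitness_finger_accuracy_calculator : List (List String) × List String × List String :=
  ([["a_b/c_d", "c_d"], ["x"]], ["p", "q"], ["p"])
def Spec_finger_accuracy_calculator (duplicate_groups : List (List String)) (non_duplicate_list : List String) (lonely_imgs : List String) (out : List Int) : Prop := out = finger_accuracy_calculator_alt duplicate_groups non_duplicate_list lonely_imgs
instance (duplicate_groups : List (List String)) (non_duplicate_list : List String) (lonely_imgs : List String) (out : List Int) : Decidable (Spec_finger_accuracy_calculator duplicate_groups non_duplicate_list lonely_imgs out) := by unfold Spec_finger_accuracy_calculator; infer_instance

-- ===== CLAIM (what is proved, stated in full; the proofs are below) =====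
def Claim_equal_finger_accuracy_calculator : Prop := ∀ (duplicate_groups : List (List String)) (non_duplicate_list : List String) (lonely_imgs : List String), Dom_finger_accuracy_calculator duplicate_groups non_duplicate_list lonely_imgs → Pre_finger_accuracy_calculator duplicate_groups non_duplicate_list lonely_imgs → Spec_finger_accuracy_calculator duplicate_groups non_duplicate_list lonely_imgs (finger_accuracy_calculator duplicate_groups non_duplicate_list lonely_imgs)

-- ===== LEMMAS AND PROOFS =====

-- the two slice spellings [0:5] and [:5] agree, so the three seg helpers agree
theorem pvSegA_eq (s : String) : pvSegA s = pvSeg s := by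
  simp [pvSegA, pvSeg, pysem]

-- A's inner tp/fp loop counts matches and mismatches
theorem foldl_match_count (p : String → Bool) (l : List String) (a b : Int) :
    l.foldl (fun (acc : Int × Int) x => if p x then (acc.1 + 1, acc.2) else (acc.1, acc.2 + 1)) (a, b)
      = (a + (l.countP p : Int), b + ((l.length : Int) - (l.countP p : Int))) := by
  induction l generalizing a b with
  | nil => simp
  | cons x t ih =>
    simp only [List.foldl_cons, List.countP_cons, List.length_cons]
    by_cases h : p x = true <;> simp [h, ih] <;> omega

-- the count of A's most-common segment equals the maximum of the counter's values
theorem count_mcs_eq_top (l : List String) (hl : l ≠ []) :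
    (l.countP (fun x =>
        ((PySem.List.max? (PySem.Dict.counter l).items (fun p => p.2)).map (fun p => p.1)).getD "" == x) : Int)
      = (PySem.List.max? (PySem.Dict.values (PySem.Dict.counter l)) (fun v => v)).getD 0 := by
  -- the items list is nonempty
  have hitems : (PySem.Dict.counter l).items ≠ [] := by
    rw [PySem.Dict.items_counter]
    simp only [ne_eq, List.map_eq_nil_iff]
    intro h
    exact hl (List.eq_nil_iff_forall_not_mem.mpr (fun x hx => by
      have := (PySem.Set.mem_ofList l x).mpr hx
      simp [h] at this))
  obtain ⟨m, hm⟩ : ∃ m, PySem.List.max? (PySem.Dict.counter l).items (fun p => p.2) = some m := by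
    cases h : PySem.List.max? (PySem.Dict.counter l).items (fun p => p.2) with
    | none => exact absurd ((PySem.List.max?_eq_none_iff _ _).mp h) hitems
    | some m => exact ⟨m, rfl⟩
  -- m = (k, count k l) with count k l maximal among item counts
  have hmem := PySem.List.max?_mem hm
  have hmax := PySem.List.max?_isMax hm
  have hv : m.2 = (l.count m.1 : Int) := by
    rw [PySem.Dict.items_counter] at hmem
    obtain ⟨k, _, hk⟩ := List.mem_map.mp hmem
    cases hk; rfl
  -- the values side
  have hvals : PySem.Dict.values (PySem.Dict.counter l) = (PySem.Dict.counter l).items.map (fun p => p.2) := rfl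
  obtain ⟨w, hw⟩ : ∃ w, PySem.List.max? (PySem.Dict.values (PySem.Dict.counter l)) (fun v => v) = some w := by
    cases h : PySem.List.max? (PySem.Dict.values (PySem.Dict.counter l)) (fun v => v) with
    | none =>
        have := (PySem.List.max?_eq_none_iff _ _).mp h
        rw [hvals] at this
        simp only [List.map_eq_nil_iff] at this
        exact absurd this hitems
    | some w => exact ⟨w, rfl⟩
  have hwmem := PySem.List.max?_mem hw
  have hwmax := PySem.List.max?_isMax hw
  -- w = m.2
  have hwm : w = m.2 := by
    apply le_antisymm
    · rw [hvals] at hwmem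
      obtain ⟨p, hp, hpw⟩ := List.mem_map.mp hwmem
      exact hpw ▸ hmax p hp
    · exact hwmax m.2 (by rw [hvals]; exact List.mem_map.mpr ⟨m, hmem, rfl⟩)
  -- countP (mcs == ·) l = count m.1 l
  have hcnt : l.countP (fun x => m.1 == x) = l.count m.1 := by
    simp only [List.count]
    apply List.countP_congr
    intro x _
    simp only [beq_iff_eq]; exact eq_comm
  rw [hm, hw, hwm, hv]
  simp only [Option.map_some, Option.getD_some]
  norm_cast

theorem finger_tn (non_duplicate_list lonely_imgs : List String) :
    (if lonely_imgs = [] then (0 : Int)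
      else non_duplicate_list.foldl (fun tn img => if lonely_imgs.contains img then tn + 1 else tn) 0)
    = (non_duplicate_list.countP (fun img => PySem.Set.contains (PySem.Set.ofList lonely_imgs) img) : Int) := by
  have hc : ∀ img, PySem.Set.contains (PySem.Set.ofList lonely_imgs) img = lonely_imgs.contains img := by
    intro img; simp [pysem]
  split_ifs with h
  · subst h; simp
  · rw [PySem.List.foldl_count_if]
    simp only [hc, zero_add]

-- ===== VERDICT (by name: the statement is the Claim_ definition above) =====
theorem finger_accuracy_calculator_spec : Claim_equal_finger_accuracy_calculator := by
  intro duplicate_groups non_duplicate_list lonely_imgs _ hpre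
  unfold Spec_finger_accuracy_calculator finger_accuracy_calculator finger_accuracy_calculator_alt
  simp only []
  rw [finger_tn]
  congr 1
  · -- true_pos components: the two outer folds agree
    congr 1
    apply PySem.List.foldl_congr_mem
    intro acc g hg
    obtain ⟨a, b⟩ := acc
    have hne : g ≠ [] := hpre g hg
    have hseg : g.map pvSegA = g.map pvSeg := by
      simp [pvSegA_eq]
    simp only [hseg]
    rw [foldl_match_count]
    have := count_mcs_eq_top (g.map pvSeg) (by simpa using hne)
    have hcp : (g.countP (fun path =>
        ((PySem.List.max? (PySem.Dict.counter (g.map pvSeg)).items (fun p => p.2)).map (fun p => p.1)).getD "" == pvSeg path) : Nat)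
        = ((g.map pvSeg).countP (fun x =>
        ((PySem.List.max? (PySem.Dict.counter (g.map pvSeg)).items (fun p => p.2)).map (fun p => p.1)).getD "" == x)) := by
      rw [List.countP_map]
      apply List.countP_congr
      intro x _
      rfl
    rw [hcp]
    rw [this]
  · congr 2
    apply PySem.List.foldl_congr_mem
    intro acc g hg
    obtain ⟨a, b⟩ := acc
    have hne : g ≠ [] := hpre g hg
    have hseg : g.map pvSegA = g.map pvSeg := by
      simp [pvSegA_eq]
    simp only [hseg]
    rw [foldl_match_count]
    have := count_mcs_eq_top (g.map pvSeg) (by simpa using hne)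
    have hcp : (g.countP (fun path =>
        ((PySem.List.max? (PySem.Dict.counter (g.map pvSeg)).items (fun p => p.2)).map (fun p => p.1)).getD "" == pvSeg path) : Nat)
        = ((g.map pvSeg).countP (fun x =>
        ((PySem.List.max? (PySem.Dict.counter (g.map pvSeg)).items (fun p => p.2)).map (fun p => p.1)).getD "" == x)) := by
      rw [List.countP_map]
      apply List.countP_congr
      intro x _
      rfl
    rw [hcp]
    rw [this]
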